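-- pv_equiv track=rewrite | github.com/SvenShan2355/ARCPY | Block_level_Hierarchical_clustering/hierarchical_cluster.py | count_same_street
-- ===== SOURCE A (Python) =====
-- def count_same_street(blocks_id_dict, blocks_dict):
--     i = 0
--     matrix = []
--
--     for block_key1 in blocks_id_dict.keys():
--         matrix.append([])
--         if blocks_id_dict[block_key1] in blocks_dict.keys():
--             set1 = set(blocks_dict[blocks_id_dict[block_key1]])
--             for block_key2 in blocks_id_dict.keys():
--                 if blocks_id_dict[block_key2] in blocks_dict.keys():
--                     set2 = set(blocks_dict[blocks_id_dict[block_key2]])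
--                     if block_key1 != block_key2:
--                         matrix[i].append(len(set1 & set2))
--                     else:
--                         matrix[i].append(0)
--                 else:
--                     matrix[i].append(0)
--         else:
--             matrix[i] = ([0] * len(blocks_id_dict))
--         i += 1
--     return matrix
-- ===== SOURCE B (Python) =====
-- def count_same_street(blocks_id_dict, blocks_dict):
--     keys = list(blocks_id_dict)
--     n = len(keys)
--     sets = [set(blocks_dict[blocks_id_dict[k]]) if blocks_id_dict[k] in blocks_dict else None
--             for k in keys]
--     inv = {}
--     for i, s in enumerate(sets):
--         if s is not None:
--             for street in s:
--                 inv.setdefault(street, []).append(i)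
--     matrix = [[0] * n for _ in range(n)]
--     for idxs in inv.values():
--         for i in idxs:
--             for j in idxs:
--                 if i != j:
--                     matrix[i][j] += 1
--     return matrix
-- ===== Notes on version B (the rewrite author's own statement) =====
-- stated objective: alternative
-- what changed: Instead of rebuilding both street sets and intersecting them for every ordered block pair, B resolves each block's street set once, builds an inverted index street -> list of block positions, and accumulates each street's co-occurring ordered pairs into a zero-initialised matrix by in-place increments.
import Mathlib
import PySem

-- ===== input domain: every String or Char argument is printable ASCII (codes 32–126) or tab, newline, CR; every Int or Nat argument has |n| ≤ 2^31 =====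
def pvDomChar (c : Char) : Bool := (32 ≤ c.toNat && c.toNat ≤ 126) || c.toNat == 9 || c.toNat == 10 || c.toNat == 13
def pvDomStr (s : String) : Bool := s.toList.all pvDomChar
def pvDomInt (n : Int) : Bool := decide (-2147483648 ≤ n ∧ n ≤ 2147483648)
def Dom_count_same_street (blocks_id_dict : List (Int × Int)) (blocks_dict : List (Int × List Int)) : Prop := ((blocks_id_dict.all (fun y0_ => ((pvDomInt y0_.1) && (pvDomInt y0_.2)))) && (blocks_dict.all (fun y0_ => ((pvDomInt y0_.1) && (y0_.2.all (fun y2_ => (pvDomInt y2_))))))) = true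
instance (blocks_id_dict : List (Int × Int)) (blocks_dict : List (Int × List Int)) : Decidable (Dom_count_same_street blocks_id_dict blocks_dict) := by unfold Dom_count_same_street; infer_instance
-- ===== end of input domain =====

-- B replaces A's pairwise set intersections by one inverted street->blocks index whose
-- co-occurring block pairs are scattered into a zero matrix (objective: alternative).


-- ===== PORT A =====
-- literal transliteration of A: for every key pair, rebuild both street sets and take |set1 & set2|.
-- A's running index i always addresses the last appended row, so matrix.append([]) / matrix[i].append(x)
-- / matrix[i] = [0]*n become "build the row, then append it".  getD's defaults are never used:
-- k1/k2 range over d1's keys, so the lookups always hit.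
def count_same_street (blocks_id_dict : List (Int × Int)) (blocks_dict : List (Int × List Int)) : List (List Int) :=
  let d1 : PySem.Dict Int Int := PySem.Dict.mk blocks_id_dict
  let d2 : PySem.Dict Int (List Int) := PySem.Dict.mk blocks_dict
  d1.keys.foldl (fun matrix k1 =>
    if d2.contains (d1.getD k1 0) then
      let set1 : PySem.Set Int := PySem.Set.ofList (d2.getD (d1.getD k1 0) [])
      let row : List Int := d1.keys.foldl (fun row k2 =>
        if d2.contains (d1.getD k2 0) then
          let set2 : PySem.Set Int := PySem.Set.ofList (d2.getD (d1.getD k2 0) [])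
          if k1 ≠ k2 then row ++ [((set1.inter set2).length : Int)]
          else row ++ [0]
        else row ++ [0]) []
      matrix ++ [row]
    else matrix ++ [PySem.List.pyRepeat [0] (d1.size : Int)]) []

-- ===== PORT B =====
-- literal transliteration of B (Source B): resolve each block's street set once, build an inverted
-- index street -> list of block positions, count ordered pairs per street, read the matrix off.
def count_same_street_alt (blocks_id_dict : List (Int × Int)) (blocks_dict : List (Int × List Int)) : List (List Int) :=
  let d1 : PySem.Dict Int Int := PySem.Dict.mk blocks_id_dict
  let d2 : PySem.Dict Int (List Int) := PySem.Dict.mk blocks_dict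
  let keys := d1.keys
  let n : Int := (keys.length : Int)
  let sets : List (Option (PySem.Set Int)) :=
    keys.map (fun k => if d2.contains (d1.getD k 0)
                       then some (PySem.Set.ofList (d2.getD (d1.getD k 0) []))
                       else none)
  let inv : PySem.Dict Int (List Int) :=
    (PySem.List.enumerate sets).foldl (fun inv p =>
      match p.2 with
      | some s => s.foldl (fun inv street => inv.modify street [] (fun l => l ++ [p.1])) inv
      | none => inv) PySem.Dict.empty
  -- matrix = [[0]*n for _ in range(n)]
  let matrix : List (List Int) := (PySem.List.pyRange 0 n 1).map (fun _ => PySem.List.pyRepeat [0] n)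
  -- matrix[i][j] += 1, ported by hand: the indices come from enumerate, so they are
  -- nonnegative and < n; on that range Python's list indexing is exactly set/getD at .toNat
  inv.values.foldl (fun matrix idxs =>
    idxs.foldl (fun matrix i =>
      idxs.foldl (fun matrix j =>
        if i ≠ j then
          matrix.set i.toNat ((matrix.getD i.toNat []).set j.toNat
            ((matrix.getD i.toNat []).getD j.toNat 0 + 1))
        else matrix) matrix) matrix) matrix

-- ===== PRECONDITION & SPEC =====
-- Pre_ excludes association lists whose blocks_id_dict part has duplicate keys: such lists do not
-- represent a Python dict (dict keys are unique), so neither program's behaviour there is specified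
-- by A (A compares keys, B compares positions; they coincide exactly when keys are unique).
def Pre_count_same_street (blocks_id_dict : List (Int × Int)) (blocks_dict : List (Int × List Int)) : Prop :=
  (blocks_id_dict.map Prod.fst).Nodup
instance (blocks_id_dict : List (Int × Int)) (blocks_dict : List (Int × List Int)) : Decidable (Pre_count_same_street blocks_id_dict blocks_dict) := by unfold Pre_count_same_street; infer_instance

def pvWitness_count_same_street : (List (Int × Int)) × (List (Int × List Int)) :=
  ([(1, 10), (2, 11), (3, 7)], [(10, [5, 6, 6]), (11, [5, 8])])

def Spec_count_same_street (blocks_id_dict : List (Int × Int)) (blocks_dict : List (Int × List Int)) (out : List (List Int)) : Prop := out = count_same_street_alt blocks_id_dict blocks_dict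
instance (blocks_id_dict : List (Int × Int)) (blocks_dict : List (Int × List Int)) (out : List (List Int)) : Decidable (Spec_count_same_street blocks_id_dict blocks_dict out) := by unfold Spec_count_same_street; infer_instance

-- ===== CLAIM (what is proved, stated in full; the proofs are below) =====
def Claim_equal_count_same_street : Prop := ∀ (blocks_id_dict : List (Int × Int)) (blocks_dict : List (Int × List Int)), Dom_count_same_street blocks_id_dict blocks_dict → Pre_count_same_street blocks_id_dict blocks_dict → Spec_count_same_street blocks_id_dict blocks_dict (count_same_street blocks_id_dict blocks_dict)

-- ===== LEMMAS AND PROOFS =====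

-- the street set attached to key k (shared shape of both ports)
def csOs (blocks_id_dict : List (Int × Int)) (blocks_dict : List (Int × List Int)) (k : Int) : Option (PySem.Set Int) :=
  if (PySem.Dict.mk blocks_dict).contains ((PySem.Dict.mk blocks_id_dict).getD k 0)
  then some (PySem.Set.ofList ((PySem.Dict.mk blocks_dict).getD ((PySem.Dict.mk blocks_id_dict).getD k 0) []))
  else none

-- the matrix entry both ports compute, as a function of the two keys
def csEntry (blocks_id_dict : List (Int × Int)) (blocks_dict : List (Int × List Int)) (k1 k2 : Int) : Int :=
  match csOs blocks_id_dict blocks_dict k1, csOs blocks_id_dict blocks_dict k2 with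
  | some s, some t => if k1 ≠ k2 then ((PySem.Set.inter s t).length : Int) else 0
  | _, _ => 0

theorem csA_eq (bid : List (Int × Int)) (bd : List (Int × List Int)) :
    count_same_street bid bd =
      (bid.map Prod.fst).map (fun k1 => (bid.map Prod.fst).map (fun k2 => csEntry bid bd k1 k2)) := by
  unfold count_same_street
  simp only []
  have hkeys : (PySem.Dict.mk bid).keys = bid.map Prod.fst := rfl
  rw [hkeys]
  have hstep : (fun (matrix : List (List Int)) (k1 : Int) =>
      (if (PySem.Dict.mk bd).contains ((PySem.Dict.mk bid).getD k1 0) = true then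
        matrix ++ [List.foldl (fun row k2 =>
          if (PySem.Dict.mk bd).contains ((PySem.Dict.mk bid).getD k2 0) = true then
            (if k1 ≠ k2 then row ++ [(((PySem.Set.ofList ((PySem.Dict.mk bd).getD ((PySem.Dict.mk bid).getD k1 0) [])).inter
                (PySem.Set.ofList ((PySem.Dict.mk bd).getD ((PySem.Dict.mk bid).getD k2 0) []))).length : Int)]
             else row ++ [0])
          else row ++ [0]) [] (bid.map Prod.fst)]
      else matrix ++ [PySem.List.pyRepeat [0] ((PySem.Dict.mk bid).size : Int)]))
      = fun matrix k1 => matrix ++ [(bid.map Prod.fst).map (fun k2 => csEntry bid bd k1 k2)] := by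
    funext matrix k1
    by_cases h1 : (PySem.Dict.mk bd).contains ((PySem.Dict.mk bid).getD k1 0)
    · simp only [h1, if_true]
      congr 2
      have hrow : (fun (row : List Int) (k2 : Int) =>
          (if (PySem.Dict.mk bd).contains ((PySem.Dict.mk bid).getD k2 0) = true then
            (if k1 ≠ k2 then row ++ [(((PySem.Set.ofList ((PySem.Dict.mk bd).getD ((PySem.Dict.mk bid).getD k1 0) [])).inter
                (PySem.Set.ofList ((PySem.Dict.mk bd).getD ((PySem.Dict.mk bid).getD k2 0) []))).length : Int)]
             else row ++ [0])
          else row ++ [0])) = fun row k2 => row ++ [csEntry bid bd k1 k2] := by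
        funext row k2
        unfold csEntry csOs
        by_cases h2 : (PySem.Dict.mk bd).contains ((PySem.Dict.mk bid).getD k2 0) <;>
          simp only [h1, h2, if_true] <;> split_ifs <;> rfl
      rw [hrow, PySem.List.foldl_append_singleton_eq_map]
      rfl
    · simp only [h1, if_false]
      congr 2
      have hz : ∀ k2 ∈ bid.map Prod.fst, csEntry bid bd k1 k2 = 0 := by
        intro k2 _; unfold csEntry csOs; simp [h1]
      rw [List.map_congr_left hz, PySem.List.pyRepeat_singleton]
      simp [PySem.Dict.size, Function.comp_def, List.map_const']
  rw [hstep, PySem.List.foldl_append_singleton_eq_map]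
  rfl

-- proof-side helpers
def csIncs (g : List Int) : List (Int × Int) :=
  g.flatMap (fun a => (g.filter (fun j => decide (a ≠ j))).map (fun j => (a, j)))
def csPst (st : Int) (os : Option (PySem.Set Int)) : Bool :=
  match os with | some s => decide (st ∈ s) | none => false
def csGrp (sets : List (Option (PySem.Set Int))) (st : Int) : List Int :=
  (PySem.List.enumerate sets).flatMap (fun p => if csPst st p.2 then [p.1] else [])
def csPairs (sets : List (Option (PySem.Set Int))) : List (Int × Int) :=
  (PySem.List.enumerate sets).flatMap (fun p =>
    match p.2 with | some s => s.map (fun st => (st, p.1)) | none => ([] : List (Int × Int)))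
def csS (sets : List (Option (PySem.Set Int))) : List Int :=
  PySem.Set.ofList ((csPairs sets).map Prod.fst)

-- the nested scatter loop is the flat scatter loop over all increment pairs
def csStep (m : List (List Int)) (p : Int × Int) : List (List Int) :=
  m.set p.1.toNat ((m.getD p.1.toNat []).set p.2.toNat ((m.getD p.1.toNat []).getD p.2.toNat 0 + 1))

theorem csFlattenM (vals : List (List Int)) (m0 : List (List Int)) :
    (vals.foldl (fun matrix idxs =>
      idxs.foldl (fun matrix i =>
        idxs.foldl (fun matrix j =>
          if i ≠ j then
            matrix.set i.toNat ((matrix.getD i.toNat []).set j.toNat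
              ((matrix.getD i.toNat []).getD j.toNat 0 + 1))
          else matrix) matrix) matrix) m0)
    = (vals.flatMap csIncs).foldl csStep m0 := by
  rw [List.foldl_flatMap]
  congr 1
  funext m idxs
  unfold csIncs
  rw [List.foldl_flatMap]
  congr 1
  funext m' i
  rw [PySem.List.foldl_ite_eq_foldl_filter (p := fun j => i ≠ j)
        (f := fun (m : List (List Int)) j =>
          m.set i.toNat ((m.getD i.toNat []).set j.toNat
            ((m.getD i.toNat []).getD j.toNat 0 + 1))),
      List.foldl_map]
  rfl

theorem csL1b (sets : List (Option (PySem.Set Int))) :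
    ((PySem.List.enumerate sets).foldl (fun inv p =>
      match p.2 with
      | some s => s.foldl (fun inv street => inv.modify street [] (fun l => l ++ [p.1])) inv
      | none => inv) (PySem.Dict.empty : PySem.Dict Int (List Int)))
    = (csPairs sets).foldl (fun d q => d.modify q.1 [] (fun l => l ++ [q.2])) PySem.Dict.empty := by
  unfold csPairs
  rw [List.foldl_flatMap]
  congr 1
  funext inv p
  match hp : p.2 with
  | some s => simp only [List.foldl_map]
  | none => simp

theorem csEnumSndMem {α : Type} (l : List α) : ∀ (s : Int) (p : Int × α),
    p ∈ PySem.List.enumerate l s → p.2 ∈ l := by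
  induction l with
  | nil => intro s p h; simp [PySem.List.enumerate_nil] at h
  | cons x t ih =>
    intro s p h
    rw [PySem.List.enumerate_cons] at h
    rcases List.mem_cons.mp h with h | h
    · subst h; simp
    · exact List.mem_cons_of_mem _ (ih _ _ h)

theorem csL1e (sets : List (Option (PySem.Set Int)))
    (hnd : ∀ os ∈ sets, ∀ s, os = some s → List.Nodup s) (st : Int) :
    ((csPairs sets).filter (fun q => q.1 == st)).map Prod.snd = csGrp sets st := by
  unfold csPairs csGrp
  rw [List.filter_flatMap, List.map_flatMap]
  apply List.flatMap_congr
  intro p hp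
  match hos : p.2 with
  | none => simp [csPst]
  | some s =>
    have hs : List.Nodup s := hnd p.2 (csEnumSndMem sets 0 p hp) s hos
    rw [List.filter_map]
    have : ((fun q => q.1 == st) ∘ fun st' => (st', p.1)) = (fun st' => st' == st) := rfl
    rw [this, List.filter_beq, csPst]
    by_cases hm : st ∈ s
    · rw [List.count_eq_one_of_mem hs hm]; simp [hm]
    · rw [List.count_eq_zero.mpr hm]; simp [hm]

theorem csInvKeys (sets : List (Option (PySem.Set Int))) :
    ((csPairs sets).foldl (fun d q => d.modify q.1 [] (fun l => l ++ [q.2]))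
      (PySem.Dict.empty : PySem.Dict Int (List Int))).keys = csS sets := by
  rw [PySem.Dict.keys_foldl_modify_key (csPairs sets) (fun q => q.1) []
        (fun _ q => (fun l => l ++ [q.2]))]
  unfold csS
  rw [show (PySem.Dict.empty : PySem.Dict Int (List Int)).keys = PySem.Set.empty from rfl,
      PySem.Set.update_empty]

theorem csInvKeysNodup (sets : List (Option (PySem.Set Int))) :
    ((csPairs sets).foldl (fun d q => d.modify q.1 [] (fun l => l ++ [q.2]))
      (PySem.Dict.empty : PySem.Dict Int (List Int))).keys.Nodup := by
  rw [csInvKeys]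
  exact PySem.Set.nodup_ofList _

theorem csInvGetD (sets : List (Option (PySem.Set Int))) (st : Int) :
    ((csPairs sets).foldl (fun d q => d.modify q.1 [] (fun l => l ++ [q.2]))
      (PySem.Dict.empty : PySem.Dict Int (List Int))).getD st []
    = ((csPairs sets).filter (fun q => q.1 == st)).map Prod.snd := by
  rw [PySem.Dict.getD_foldl_modify_append]
  simp [PySem.Dict.getD_empty]

theorem csInvValues (sets : List (Option (PySem.Set Int)))
    (hnd : ∀ os ∈ sets, ∀ s, os = some s → List.Nodup s) :
    ((csPairs sets).foldl (fun d q => d.modify q.1 [] (fun l => l ++ [q.2]))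
      (PySem.Dict.empty : PySem.Dict Int (List Int))).values
    = (csS sets).map (csGrp sets) := by
  set inv := (csPairs sets).foldl (fun d q => d.modify q.1 [] (fun l => l ++ [q.2]))
      (PySem.Dict.empty : PySem.Dict Int (List Int)) with hinv
  have h1 : inv.items = inv.keys.map (fun k => (k, inv.getD k [])) :=
    PySem.Dict.items_eq_map_keys inv (csInvKeysNodup sets) []
  show inv.items.map Prod.snd = _
  rw [h1, List.map_map, csInvKeys]
  apply List.map_congr_left
  intro st _
  show inv.getD st [] = _
  rw [hinv, csInvGetD, csL1e sets hnd st]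

theorem csEnumFMemIff {α : Type} (P : α → Bool) (l : List α) : ∀ (s i : Int),
    (i ∈ (PySem.List.enumerate l s).flatMap (fun p => if P p.2 then [p.1] else [])
    ↔ ∃ n : Nat, ∃ _ : n < l.length, i = s + n ∧ P l[n]) := by
  induction l with
  | nil => intro s i; simp [PySem.List.enumerate_nil]
  | cons x t ih =>
    intro s i
    rw [PySem.List.enumerate_cons, List.flatMap_cons]
    constructor
    · intro h
      rcases List.mem_append.mp h with h | h
      · refine ⟨0, by simp, ?_, ?_⟩
        · by_cases hx : P x <;> simp [hx] at h; omega
        · by_cases hx : P x <;> simp [hx] at h ⊢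
      · rcases (ih (s+1) i).mp h with ⟨n, hn, hi, hp⟩
        exact ⟨n+1, by simpa using Nat.succ_lt_succ hn, by push_cast; omega, by simpa using hp⟩
    · rintro ⟨n, hn, hi, hp⟩
      match n with
      | 0 =>
        apply List.mem_append.mpr; left
        simp at hp hi; simp [hp, hi]
      | Nat.succ m =>
        apply List.mem_append.mpr; right
        refine (ih (s+1) i).mpr ⟨m, by simpa using Nat.lt_of_succ_lt_succ hn, by push_cast at hi ⊢; omega, by simpa using hp⟩

theorem csEnumFMNodup {α : Type} (P : α → Bool) (l : List α) : ∀ (s : Int),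
    ((PySem.List.enumerate l s).flatMap (fun p => if P p.2 then [p.1] else [])).Nodup := by
  induction l with
  | nil => intro s; simp [PySem.List.enumerate_nil]
  | cons x t ih =>
    intro s
    rw [PySem.List.enumerate_cons, List.flatMap_cons]
    apply List.Nodup.append
    · by_cases hx : P x <;> simp [hx]
    · exact ih (s+1)
    · intro a ha hb
      rcases (csEnumFMemIff P t (s+1) a).mp hb with ⟨n, hn, hi, hp⟩
      by_cases hx : P x <;> simp [hx] at ha
      omega

theorem csGrpMemIff (sets : List (Option (PySem.Set Int))) (st : Int) (i : Int) :
    i ∈ csGrp sets st ↔ ∃ n : Nat, ∃ _ : n < sets.length, i = (n : Int) ∧ csPst st sets[n] := by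
  unfold csGrp
  rw [csEnumFMemIff (csPst st) sets 0 i]
  simp

theorem csGrpNodup (sets : List (Option (PySem.Set Int))) (st : Int) : (csGrp sets st).Nodup :=
  csEnumFMNodup (csPst st) sets 0

theorem csEnumMemSnd {α : Type} (l : List α) (os : α) (h : os ∈ l) :
    ∀ s : Int, ∃ p ∈ PySem.List.enumerate l s, p.2 = os := by
  induction l with
  | nil => simp at h
  | cons x t ih =>
    intro s
    rcases List.mem_cons.mp h with h | h
    · exact ⟨(s, x), by rw [PySem.List.enumerate_cons]; simp, h ▸ rfl⟩
    · rcases ih h (s+1) with ⟨p, hp, hp2⟩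
      exact ⟨p, by rw [PySem.List.enumerate_cons]; exact List.mem_cons_of_mem _ hp, hp2⟩

theorem csSMemIff (sets : List (Option (PySem.Set Int))) (st : Int) :
    st ∈ csS sets ↔ ∃ os ∈ sets, csPst st os := by
  unfold csS
  rw [PySem.Set.mem_ofList]
  unfold csPairs
  rw [List.map_flatMap]
  constructor
  · intro h
    rcases List.mem_flatMap.mp h with ⟨p, hp, hm⟩
    refine ⟨p.2, csEnumSndMem sets 0 p hp, ?_⟩
    match hos : p.2 with
    | none => rw [hos] at hm; simp at hm
    | some s =>
      rw [hos] at hm; simp at hm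
      simp [csPst, hm]
  · rintro ⟨os, hos, hp⟩
    rcases csEnumMemSnd sets os hos 0 with ⟨p, hpmem, hp2⟩
    apply List.mem_flatMap.mpr
    refine ⟨p, hpmem, ?_⟩
    rw [hp2]
    match os, hp with
    | none, hp => simp [csPst] at hp
    | some s, hp =>
      simp [csPst] at hp
      simpa using hp

theorem csSNodup (sets : List (Option (PySem.Set Int))) : (csS sets).Nodup :=
  PySem.Set.nodup_ofList _

theorem csSumIte (g : List Int) (i : Int) (C : Nat) :
    (g.map (fun a => if a = i then C else 0)).sum = g.count i * C := by
  induction g with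
  | nil => simp
  | cons x t ih =>
    by_cases hx : x = i <;> simp [List.count_cons, hx, ih] <;> ring

theorem csIncsCount (g : List Int) (hg : g.Nodup) (i j : Int) :
    (csIncs g).count (i, j) = if i ∈ g ∧ j ∈ g ∧ i ≠ j then 1 else 0 := by
  unfold csIncs
  rw [List.count_flatMap]
  have hper : ∀ a : Int, (List.count (i, j) ∘ fun a =>
      (List.filter (fun j0 => decide (a ≠ j0)) g).map (fun j0 => (a, j0))) a
      = if a = i then (if j ∈ g ∧ i ≠ j then 1 else 0) else 0 := by
    intro a
    by_cases ha : a = i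
    · subst ha
      simp only [Function.comp_apply, if_true]
      have hinj : Function.Injective (fun j0 : Int => (a, j0)) := by
        intro x y h; simpa using h
      rw [show ((a, j) : Int × Int) = (fun j0 : Int => (a, j0)) j from rfl,
          List.count_map_of_injective _ _ hinj]
      by_cases hij : a = j
      · subst hij
        simp only [ne_eq, not_true_eq_false, and_false, if_false]
        rw [List.count_eq_zero]
        intro hmem
        simp [List.mem_filter] at hmem
      · rw [List.count_filter (by simp [Ne, hij])]
        by_cases hj : j ∈ g
        · simp [hj, Ne, hij, List.count_eq_one_of_mem hg hj]
        · simp [hj, List.count_eq_zero.mpr hj]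
    · simp only [Function.comp_apply, ha, if_false]
      rw [List.count_eq_zero]
      intro hmem
      rcases List.mem_map.mp hmem with ⟨j0, _, heq⟩
      exact ha (by simpa using congrArg Prod.fst heq)
  rw [List.map_congr_left (fun a _ => hper a), csSumIte]
  by_cases hi : i ∈ g
  · rw [List.count_eq_one_of_mem hg hi]
    by_cases h2 : j ∈ g ∧ i ≠ j <;> simp [hi, h2] <;> tauto
  · rw [List.count_eq_zero.mpr hi]
    simp [hi]

theorem csSumIndicator (l : List Int) (p : Int → Bool) :
    (l.map (fun st => if p st then 1 else 0)).sum = l.countP p := by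
  induction l with
  | nil => simp
  | cons x t ih => by_cases hx : p x <;> simp [List.countP_cons, hx, ih] <;> omega

theorem csMainCount (sets : List (Option (PySem.Set Int)))
    (hnd : ∀ os ∈ sets, ∀ s, os = some s → List.Nodup s)
    (i j : Nat) (hi : i < sets.length) (hj : j < sets.length) :
    ((((csS sets).map (csGrp sets)).flatMap csIncs).count ((i : Int), (j : Int)))
    = (match sets[i], sets[j] with
      | some s, some t => if i ≠ j then (PySem.Set.inter s t).length else 0
      | _, _ => 0) := by
  rw [List.count_flatMap, List.map_map]
  have hmem : ∀ (k : Nat) (hk : k < sets.length) (st : Int),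
      ((k : Int) ∈ csGrp sets st) ↔ csPst st sets[k] := by
    intro k hk st
    rw [csGrpMemIff]
    constructor
    · rintro ⟨n, hn, hkn, hp⟩
      have : n = k := by exact_mod_cast hkn.symm
      subst this; exact hp
    · intro hp; exact ⟨k, hk, rfl, hp⟩
  have hper : ∀ st ∈ csS sets,
      (((List.count ((i : Int), (j : Int)) ∘ csIncs) ∘ csGrp sets) st)
      = if (csPst st sets[i] && csPst st sets[j] && decide (i ≠ j)) then 1 else 0 := by
    intro st _
    simp only [Function.comp_apply]
    rw [csIncsCount _ (csGrpNodup sets st)]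
    by_cases h1 : csPst st sets[i] <;> by_cases h2 : csPst st sets[j] <;> by_cases h3 : i ≠ j <;>
      simp [hmem i hi st, hmem j hj st, h1, h2, h3, Int.natCast_inj]
  rw [List.map_congr_left hper, csSumIndicator]
  match hsi : sets[i], hsj : sets[j] with
  | none, _ =>
    rw [List.countP_eq_length_filter]
    simp [csPst]
  | some s, none =>
    rw [List.countP_eq_length_filter]
    simp [csPst]
  | some s, some t =>
    show _ = if i ≠ j then (PySem.Set.inter s t).length else 0
    by_cases hij : i ≠ j
    · rw [List.countP_eq_length_filter, if_pos hij]
      have harg : (fun a => csPst a (some s) && csPst a (some t) && decide (i ≠ j))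
          = (fun a => csPst a (some s) && csPst a (some t)) := by
        funext a; simp [hij]
      rw [harg]
      have hsnd : List.Nodup s := hnd sets[i] (List.getElem_mem hi) s hsi
      have hperm : (List.filter (fun st => csPst st (some s) && csPst st (some t)) (csS sets)).Perm
          (PySem.Set.inter s t) := by
        apply (List.perm_ext_iff_of_nodup (List.Nodup.filter _ (csSNodup sets))
              (List.Nodup.filter _ hsnd)).mpr
        intro x
        rw [List.mem_filter, List.mem_filter, PySem.Set.contains_iff]
        constructor
        · rintro ⟨_, hx⟩
          simp [csPst] at hx
          exact hx
        · intro hx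
          refine ⟨(csSMemIff sets x).mpr ⟨sets[i], List.getElem_mem hi, by rw [hsi]; simpa [csPst] using hx.1⟩, ?_⟩
          simp [csPst, hx.1, hx.2]
      exact hperm.length_eq
    · rw [if_neg hij]
      have harg : (fun a => csPst a (some s) && csPst a (some t) && decide (i ≠ j))
          = (fun _ => false) := by
        funext a; simp [hij]
      rw [harg]
      simp

theorem csScatter (w : Nat) (l : List (Int × Int)) : ∀ (m : List (List Int)),
    (∀ p ∈ l, 0 ≤ p.1 ∧ p.1.toNat < m.length ∧ 0 ≤ p.2 ∧ p.2.toNat < w) →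
    (∀ r ∈ m, r.length = w) →
    (l.foldl csStep m).length = m.length
    ∧ (∀ r ∈ l.foldl csStep m, r.length = w)
    ∧ ∀ (a b : Nat), a < m.length → b < w →
        ((l.foldl csStep m).getD a []).getD b 0
          = (m.getD a []).getD b 0 + (l.count ((a : Int), (b : Int)) : Int) := by
  induction l with
  | nil => intro m _ hrow; refine ⟨rfl, hrow, ?_⟩; intro a b _ _; simp
  | cons p t ih =>
    intro m hb hrow
    have hp := hb p (List.mem_cons_self)
    have hlen : (csStep m p).length = m.length := by
      unfold csStep; exact List.length_set
    have hrow' : ∀ r ∈ csStep m p, r.length = w := by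
      intro r hr
      unfold csStep at hr
      rcases List.mem_or_eq_of_mem_set hr with hr | hr
      · exact hrow r hr
      · subst hr
        rw [List.length_set]
        exact hrow _ (by
          rw [List.getD_eq_getElem _ _ hp.2.1]
          exact List.getElem_mem hp.2.1)
    have hb' : ∀ q ∈ t, 0 ≤ q.1 ∧ q.1.toNat < (csStep m p).length ∧ 0 ≤ q.2 ∧ q.2.toNat < w := by
      intro q hq
      have := hb q (List.mem_cons_of_mem _ hq)
      rw [hlen]; exact this
    rcases ih (csStep m p) hb' hrow' with ⟨ih1, ih2, ih3⟩
    rw [List.foldl_cons]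
    refine ⟨by rw [ih1, hlen], ih2, ?_⟩
    intro a b ha hbw
    rw [ih3 a b (by rw [hlen]; exact ha) hbw]
    have hstepent : ((csStep m p).getD a []).getD b 0
        = (m.getD a []).getD b 0 + (if ((a : Int), (b : Int)) = p then 1 else 0) := by
      unfold csStep
      rw [List.getD_eq_getElem?_getD (l := List.set _ _ _), List.getElem?_set]
      by_cases hai : p.1.toNat = a
      · rw [if_pos hai, if_pos (hai ▸ hp.2.1)]
        simp only [Option.getD_some]
        rw [List.getD_eq_getElem?_getD (l := List.set _ _ _), List.getElem?_set, hai]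
        have hrlen : (m.getD a []).length = w := by
          rw [List.getD_eq_getElem _ _ (hai ▸ hp.2.1)]
          exact hrow _ (List.getElem_mem _)
        by_cases hbj : p.2.toNat = b
        · rw [if_pos hbj, if_pos (by rw [hrlen, hbj]; exact hbj ▸ hp.2.2.2)]
          have hpe : ((a : Int), (b : Int)) = p := by
            have h1 : p.1 = (a : Int) := by rw [← hai, Int.toNat_of_nonneg hp.1]
            have h2 : p.2 = (b : Int) := by rw [← hbj, Int.toNat_of_nonneg hp.2.2.1]
            cases p; simp at h1 h2 ⊢; exact ⟨h1.symm, h2.symm⟩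
          rw [if_pos hpe]
          simp [hbj]
        · rw [if_neg hbj]
          have hpe : ¬ (((a : Int), (b : Int)) = p) := by
            intro hc
            apply hbj
            rw [← hc]
            simp
          rw [if_neg hpe, ← List.getD_eq_getElem?_getD]
          simp
      · rw [if_neg hai]
        have hpe : ¬ (((a : Int), (b : Int)) = p) := by
          intro hc
          apply hai
          rw [← hc]
          simp
        rw [if_neg hpe, ← List.getD_eq_getElem?_getD]
        simp
    rw [hstepent]
    rw [List.count_cons]
    push_cast
    by_cases hpe : ((a : Int), (b : Int)) = p
    · rw [if_pos hpe, if_pos (by exact beq_iff_eq.mpr hpe.symm)]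
      ring
    · rw [if_neg hpe, if_neg (by simp; exact fun hc => hpe (by rw [hc]))]
      ring

theorem csIncsBounds (sets : List (Option (PySem.Set Int))) (p : Int × Int)
    (hp : p ∈ ((csS sets).map (csGrp sets)).flatMap csIncs) :
    0 ≤ p.1 ∧ p.1.toNat < sets.length ∧ 0 ≤ p.2 ∧ p.2.toNat < sets.length := by
  rcases List.mem_flatMap.mp hp with ⟨g, hg, hpg⟩
  rcases List.mem_map.mp hg with ⟨st, _, rfl⟩
  unfold csIncs at hpg
  rcases List.mem_flatMap.mp hpg with ⟨a, ha, hpm⟩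
  rcases List.mem_map.mp hpm with ⟨j0, hj0, rfl⟩
  have hj0g : j0 ∈ csGrp sets st := List.mem_of_mem_filter hj0
  rcases (csGrpMemIff sets st a).mp ha with ⟨n1, hn1, rfl, -⟩
  rcases (csGrpMemIff sets st j0).mp hj0g with ⟨n2, hn2, rfl, -⟩
  refine ⟨by positivity, by simpa using hn1, by positivity, by simpa using hn2⟩

theorem csEntryIdx (bid : List (Int × Int)) (bd : List (Int × List Int)) (kl : List Int)
    (h : kl.Nodup)
    (hnd : ∀ os ∈ kl.map (csOs bid bd), ∀ s, os = some s → List.Nodup s)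
    (i j : Nat) (hi : i < kl.length) (hj : j < kl.length) :
    ((((csS (kl.map (csOs bid bd))).map (csGrp (kl.map (csOs bid bd)))).flatMap csIncs).count
        ((i : Int), (j : Int)) : Int)
    = csEntry bid bd (kl[i]'hi) (kl[j]'hj) := by
  rw [csMainCount _ hnd i j (by simpa using hi) (by simpa using hj)]
  have hgi : (kl.map (csOs bid bd))[i]'(by simpa using hi) = csOs bid bd (kl[i]'hi) :=
    List.getElem_map _
  have hgj : (kl.map (csOs bid bd))[j]'(by simpa using hj) = csOs bid bd (kl[j]'hj) :=
    List.getElem_map _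
  rw [hgi, hgj]
  have hne : (kl[i]'hi ≠ kl[j]'hj) ↔ i ≠ j := by
    rw [not_iff_not]
    exact h.getElem_inj_iff
  unfold csEntry
  cases ho1 : csOs bid bd (kl[i]'hi) with
  | none => cases ho2 : csOs bid bd (kl[j]'hj) <;> simp
  | some s =>
    cases ho2 : csOs bid bd (kl[j]'hj) with
    | none => simp
    | some t =>
      simp only []
      by_cases hij : i ≠ j
      · rw [if_pos hij, if_pos (hne.mpr hij)]
      · rw [if_neg hij, if_neg (fun hc => hij (hne.mp hc))]
        simp

theorem csB_eq (bid : List (Int × Int)) (bd : List (Int × List Int))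
    (h : (bid.map Prod.fst).Nodup) :
    count_same_street_alt bid bd =
      (bid.map Prod.fst).map (fun k1 => (bid.map Prod.fst).map (fun k2 => csEntry bid bd k1 k2)) := by
  unfold count_same_street_alt
  simp only []
  have hkeys : (PySem.Dict.mk bid).keys = bid.map Prod.fst := rfl
  rw [hkeys]
  set kl := bid.map Prod.fst with hkl
  clear_value kl
  clear hkl hkeys
  have hos : (fun k => if (PySem.Dict.mk bd).contains ((PySem.Dict.mk bid).getD k 0)
      then some (PySem.Set.ofList ((PySem.Dict.mk bd).getD ((PySem.Dict.mk bid).getD k 0) []))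
      else none) = csOs bid bd := rfl
  rw [hos]
  have hnd : ∀ os ∈ kl.map (csOs bid bd), ∀ s, os = some s → List.Nodup s := by
    intro os hosm s hs
    rcases List.mem_map.mp hosm with ⟨k, _, hk⟩
    unfold csOs at hk
    subst hs
    split at hk
    · cases hk; exact PySem.Set.nodup_ofList _
    · cases hk
  rw [csL1b (kl.map (csOs bid bd)), csInvValues (kl.map (csOs bid bd)) hnd, csFlattenM]
  have hrange : PySem.List.pyRange 0 ((kl.length : Nat) : Int) 1
      = (List.range kl.length).map (fun k : Nat => (k : Int)) :=
    PySem.List.pyRange_zero_natCast kl.length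
  set m0 : List (List Int) :=
    (PySem.List.pyRange 0 ((kl.length : Nat) : Int) 1).map
      (fun _ => PySem.List.pyRepeat [0] ((kl.length : Nat) : Int)) with hm0
  set incs := (((csS (kl.map (csOs bid bd))).map (csGrp (kl.map (csOs bid bd)))).flatMap csIncs)
    with hincs
  have hm0len : m0.length = kl.length := by
    rw [hm0, List.length_map, hrange, List.length_map, List.length_range]
  have hm0row : ∀ r ∈ m0, r.length = kl.length := by
    intro r hr
    rcases List.mem_map.mp hr with ⟨-, -, rfl⟩
    rw [PySem.List.pyRepeat_singleton, List.length_replicate]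
    simp
  have hm0ent : ∀ a b : Nat, a < kl.length → b < kl.length → (m0.getD a []).getD b 0 = 0 := by
    intro a b ha hb
    have haa : a < m0.length := by rw [hm0len]; exact ha
    rw [List.getD_eq_getElem _ _ haa]
    simp only [hm0, List.getElem_map, PySem.List.pyRepeat_singleton]
    exact List.getD_replicate 0 (by simpa using hb)
  have hbnd : ∀ p ∈ incs, 0 ≤ p.1 ∧ p.1.toNat < m0.length ∧ 0 ≤ p.2 ∧ p.2.toNat < kl.length := by
    intro p hp
    have := csIncsBounds (kl.map (csOs bid bd)) p (hincs ▸ hp)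
    rw [List.length_map] at this
    rw [hm0len]
    exact this
  rcases csScatter kl.length incs m0 hbnd hm0row with ⟨hs1, hs2, hs3⟩
  apply List.ext_getElem
  · rw [hs1, hm0len, List.length_map]
  · intro i hi hi'
    have hi2 : i < kl.length := by rw [hs1, hm0len] at hi; exact hi
    apply List.ext_getElem
    · rw [hs2 _ (List.getElem_mem hi), List.getElem_map, List.length_map]
    · intro j hj hj'
      have hj2 : j < kl.length := by rw [hs2 _ (List.getElem_mem hi)] at hj; exact hj
      have hent := hs3 i j (by rw [hm0len]; exact hi2) hj2
      rw [hm0ent i j hi2 hj2, zero_add] at hent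
      have hL : (incs.foldl csStep m0)[i][j] = ((incs.foldl csStep m0).getD i []).getD j 0 := by
        rw [List.getD_eq_getElem _ _ hi, List.getD_eq_getElem _ _ hj]
      rw [hL, hent]
      simp only [List.getElem_map]
      exact csEntryIdx bid bd kl h hnd i j hi2 hj2

-- ===== VERDICT (by name: the statement is the Claim_ definition above) =====
theorem count_same_street_spec : Claim_equal_count_same_street := by
  intro bid bd _ hpre
  unfold Spec_count_same_street
  rw [csA_eq, csB_eq bid bd hpre]
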